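-- pv_equiv track=rewrite | github.com/csirui/hall37 | source/webmgr/src/tyserver/tyutils/strutil.py | getJsonInt
-- ===== SOURCE A (Python) =====
-- def getJsonInt(jsonstr, key, defaluVal=0):
--     key = '"' + key + '":'
--     i = jsonstr.find(key)
--     if i > 0 :
--         linelen = len(jsonstr)
--         i = i + len(key)
--         value = 0
--         flg = 0
--         while i < linelen:
--             c = jsonstr[i]
--             if c == '0' :
--                 value = value * 10
--                 flg = 1
--             elif c == '1' :
--                 value = value * 10 + 1
--                 flg = 1
--             elif c == '2' :
--                 value = value * 10 + 2
--                 flg = 1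
--             elif c == '3' :
--                 value = value * 10 + 3
--                 flg = 1
--             elif c == '4' :
--                 value = value * 10 + 4
--                 flg = 1
--             elif c == '5' :
--                 value = value * 10 + 5
--                 flg = 1
--             elif c == '6' :
--                 value = value * 10 + 6
--                 flg = 1
--             elif c == '7' :
--                 value = value * 10 + 7
--                 flg = 1
--             elif c == '8' :
--                 value = value * 10 + 8
--                 flg = 1
--             elif c == '9' :
--                 value = value * 10 + 9
--                 flg = 1
--             elif c == ' ' or c == '"':
--                 pass
--             else:
--                 break
--             i += 1
--         if flg == 1 :
--             return value
--     return defaluVal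
-- ===== SOURCE B (Python) =====
-- def getJsonInt(jsonstr, key, defaluVal=0):
--     pat = '"' + key + '":'
--     i = jsonstr.find(pat)
--     if i <= 0:
--         return defaluVal
--     rest = jsonstr[i + len(pat):]
--     # leading run of allowed characters (digits, space, double-quote)
--     run = []
--     for c in rest:
--         if c not in '0123456789 "':
--             break
--         run.append(c)
--     digits = [c for c in run if c.isdigit()]
--     if not digits:
--         return defaluVal
--     value = 0
--     for c in digits:
--         value = value * 10 + (ord(c) - ord('0'))
--     return value
-- ===== Notes on version B (the rewrite author's own statement) =====
-- stated objective: idiomatic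
-- what changed: Replaces A's fused 12-branch while-loop (per-character arithmetic, flag and break all in one loop body) by a three-pass decomposition: extract the maximal leading run of allowed characters, filter it to digits, then accumulate the number from the digit list alone.
import Mathlib
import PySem

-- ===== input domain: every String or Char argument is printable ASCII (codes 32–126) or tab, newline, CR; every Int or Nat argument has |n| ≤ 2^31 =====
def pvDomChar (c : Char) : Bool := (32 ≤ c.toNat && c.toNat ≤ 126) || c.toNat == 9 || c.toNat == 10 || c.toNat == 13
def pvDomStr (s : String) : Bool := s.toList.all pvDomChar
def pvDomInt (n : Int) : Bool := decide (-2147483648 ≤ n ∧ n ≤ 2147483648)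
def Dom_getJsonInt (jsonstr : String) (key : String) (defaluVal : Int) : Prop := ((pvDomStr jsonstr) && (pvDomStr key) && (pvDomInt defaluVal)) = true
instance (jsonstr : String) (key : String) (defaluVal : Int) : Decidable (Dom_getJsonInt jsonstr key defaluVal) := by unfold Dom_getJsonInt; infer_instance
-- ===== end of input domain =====

-- B replaces A's fused 12-branch accumulating loop by extract-run → filter-digits → accumulate (idiomatic decomposition, same behaviour).

-- ===== PORT A =====
-- A's while-loop over jsonstr[i:]: state (value, flg), per-character branch chain, break on other chars.
def pvLoopA : List Char → Int → Int → Int × Int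
  | [], value, flg => (value, flg)
  | c :: rest, value, flg =>
    if c = '0' then pvLoopA rest (value * 10) 1
    else if c = '1' then pvLoopA rest (value * 10 + 1) 1
    else if c = '2' then pvLoopA rest (value * 10 + 2) 1
    else if c = '3' then pvLoopA rest (value * 10 + 3) 1
    else if c = '4' then pvLoopA rest (value * 10 + 4) 1
    else if c = '5' then pvLoopA rest (value * 10 + 5) 1
    else if c = '6' then pvLoopA rest (value * 10 + 6) 1
    else if c = '7' then pvLoopA rest (value * 10 + 7) 1
    else if c = '8' then pvLoopA rest (value * 10 + 8) 1
    else if c = '9' then pvLoopA rest (value * 10 + 9) 1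
    else if c = ' ' ∨ c = '"' then pvLoopA rest value flg
    else (value, flg)

def getJsonInt (jsonstr : String) (key : String) (defaluVal : Int) : Int :=
  let key' := "\"" ++ key ++ "\":"
  let i := PySem.Str.find jsonstr key'
  if i > 0 then
    let vf := pvLoopA (PySem.List.slice jsonstr.toList (some (i + PySem.Str.len key')) none) 0 0
    if vf.2 = 1 then vf.1 else defaluVal
  else defaluVal

-- ===== PORT B =====
-- Source B's run-extraction loop (break on a char outside the allowed set; 'c in "0123456789 \""' is
-- char-membership in that string's characters, exact for single characters).
def pvRunAllowed : List Char → List Char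
  | [] => []
  | c :: rest => if ("0123456789 \"".toList.contains c) then c :: pvRunAllowed rest else []

def getJsonInt_alt (jsonstr : String) (key : String) (defaluVal : Int) : Int :=
  let pat := "\"" ++ key ++ "\":"
  let i := PySem.Str.find jsonstr pat
  if i ≤ 0 then defaluVal
  else
    let rest := PySem.List.slice jsonstr.toList (some (i + PySem.Str.len pat)) none
    let digits := (pvRunAllowed rest).filter PySem.Chars.isdigit
    if digits = [] then defaluVal
    else digits.foldl (fun v c => v * 10 + ((c.toNat : Int) - 48)) 0

-- ===== PRECONDITION & SPEC =====
def Spec_getJsonInt (jsonstr : String) (key : String) (defaluVal : Int) (out : Int) : Prop := out = getJsonInt_alt jsonstr key defaluVal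
instance (jsonstr : String) (key : String) (defaluVal : Int) (out : Int) : Decidable (Spec_getJsonInt jsonstr key defaluVal out) := by unfold Spec_getJsonInt; infer_instance

-- ===== CLAIM (what is proved, stated in full; the proofs are below) =====
def Claim_equal_getJsonInt : Prop := ∀ (jsonstr : String) (key : String) (defaluVal : Int), Dom_getJsonInt jsonstr key defaluVal → Spec_getJsonInt jsonstr key defaluVal (getJsonInt jsonstr key defaluVal)

-- ===== LEMMAS AND PROOFS =====

-- A's fused loop computes: fold of the digit-step over the digits of the allowed run, and flag 1 iff a digit was seen.
theorem pvLoopA_eq (cs : List Char) (v f : Int) :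
    pvLoopA cs v f =
      (((pvRunAllowed cs).filter PySem.Chars.isdigit).foldl (fun v c => v * 10 + ((c.toNat : Int) - 48)) v,
       if ((pvRunAllowed cs).filter PySem.Chars.isdigit) = [] then f else 1) := by
  induction cs generalizing v f with
  | nil => simp [pvLoopA, pvRunAllowed]
  | cons c rest ih =>
    by_cases h0 : c = '0'
    · subst h0; simp [pvLoopA, pvRunAllowed, ih, PySem.Chars.isdigit]
    · by_cases h1 : c = '1'
      · subst h1; simp [pvLoopA, pvRunAllowed, ih, PySem.Chars.isdigit, h0]
      · by_cases h2 : c = '2'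
        · subst h2; simp [pvLoopA, pvRunAllowed, ih, PySem.Chars.isdigit, h0, h1]
        · by_cases h3 : c = '3'
          · subst h3; simp [pvLoopA, pvRunAllowed, ih, PySem.Chars.isdigit, h0, h1, h2]
          · by_cases h4 : c = '4'
            · subst h4; simp [pvLoopA, pvRunAllowed, ih, PySem.Chars.isdigit, h0, h1, h2, h3]
            · by_cases h5 : c = '5'
              · subst h5; simp [pvLoopA, pvRunAllowed, ih, PySem.Chars.isdigit, h0, h1, h2, h3, h4]
              · by_cases h6 : c = '6'
                · subst h6; simp [pvLoopA, pvRunAllowed, ih, PySem.Chars.isdigit, h0, h1, h2, h3, h4, h5]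
                · by_cases h7 : c = '7'
                  · subst h7; simp [pvLoopA, pvRunAllowed, ih, PySem.Chars.isdigit, h0, h1, h2, h3, h4, h5, h6]
                  · by_cases h8 : c = '8'
                    · subst h8; simp [pvLoopA, pvRunAllowed, ih, PySem.Chars.isdigit, h0, h1, h2, h3, h4, h5, h6, h7]
                    · by_cases h9 : c = '9'
                      · subst h9; simp [pvLoopA, pvRunAllowed, ih, PySem.Chars.isdigit, h0, h1, h2, h3, h4, h5, h6, h7, h8]
                      · by_cases hs : c = ' ' ∨ c = '"'
                        · rcases hs with hs | hs <;> subst hs <;>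
                            simp [pvLoopA, pvRunAllowed, ih, PySem.Chars.isdigit, h0, h1, h2, h3, h4, h5, h6, h7, h8, h9]
                        · push Not at hs
                          simp [pvLoopA, pvRunAllowed, h0, h1, h2, h3, h4, h5, h6, h7, h8, h9, hs.1, hs.2]

lemma pvAux (cs : List Char) (d : Int) :
    (if (pvLoopA cs 0 0).2 = 1 then (pvLoopA cs 0 0).1 else d) =
    (if (pvRunAllowed cs).filter PySem.Chars.isdigit = [] then d
     else ((pvRunAllowed cs).filter PySem.Chars.isdigit).foldl (fun v c => v * 10 + ((c.toNat : Int) - 48)) 0) := by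
  by_cases hd : (pvRunAllowed cs).filter PySem.Chars.isdigit = []
  · simp [pvLoopA_eq, hd]
  · simp [pvLoopA_eq, hd]

-- ===== VERDICT (by name: the statement is the Claim_ definition above) =====
theorem getJsonInt_spec : Claim_equal_getJsonInt := by
  intro jsonstr key defaluVal _
  unfold Spec_getJsonInt getJsonInt getJsonInt_alt
  dsimp only
  by_cases hi : PySem.Str.find jsonstr ("\"" ++ key ++ "\":") > 0
  · rw [if_pos hi, if_neg (by omega : ¬ PySem.Str.find jsonstr ("\"" ++ key ++ "\":") ≤ 0)]
    exact pvAux _ _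
  · rw [if_neg hi, if_pos (by omega : PySem.Str.find jsonstr ("\"" ++ key ++ "\":") ≤ 0)]
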